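-- pv_equiv track=rewrite | github.com/paulklemstine/factor | lean/demo/New/IdempotentResearch/demos/idempotent_density.py | gaussian_binomial
-- ===== SOURCE A (Python) =====
-- import math
--
-- def gaussian_binomial(n: int, k: int, q: int) -> int:
--     """Compute the Gaussian binomial coefficient [n choose k]_q.
--
--     [n choose k]_q = ∏_{i=0}^{k-1} (q^{n-i} - 1) / (q^{i+1} - 1)
--     """
--     if k < 0 or k > n:
--         return 0
--     if k == 0:
--         return 1
--     if q == 1:
--         return math.comb(n, k)
--     num = 1
--     den = 1
--     for i in range(k):
--         num *= (q ** (n - i) - 1)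
--         den *= (q ** (i + 1) - 1)
--     return num // den
-- ===== SOURCE B (Python) =====
-- import math
--
--
-- def gaussian_binomial(n: int, k: int, q: int) -> int:
--     """Gaussian binomial [n choose k]_q by the division-free q-Pascal DP
--     [m, j]_q = [m-1, j-1]_q + q**j * [m-1, j]_q."""
--     if k < 0 or k > n:
--         return 0
--     if k == 0:
--         return 1
--     if q == 1:
--         return math.comb(n, k)
--     row = [1] + [0] * k          # row for m = 0: [0,0]_q = 1, [0,j]_q = 0
--     for _ in range(n):
--         row = [1] + [row[j - 1] + q ** j * row[j] for j in range(1, k + 1)]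
--     return row[k]
-- ===== Notes on version B (the rewrite author's own statement) =====
-- stated objective: alternative
-- what changed: B replaces A's two accumulated products followed by one big floor division with a division-free dynamic program over the q-Pascal recurrence [m,j]_q = [m-1,j-1]_q + q^j*[m-1,j]_q, building a row of k+1 partial q-binomials for n iterations (A's four guard branches, including the q==1 math.comb shortcut, are kept).
-- crash fix: On q = -1 with 2 <= k <= n, A raises ZeroDivisionError (a denominator factor q^2 - 1 is 0) while B's division-free DP returns the Gaussian binomial evaluated at q = -1, e.g. 2 at (4, 2, -1). — e.g. on gaussian_binomial(4, 2, -1): A raises ZeroDivisionError, B returns 2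
import Mathlib
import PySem

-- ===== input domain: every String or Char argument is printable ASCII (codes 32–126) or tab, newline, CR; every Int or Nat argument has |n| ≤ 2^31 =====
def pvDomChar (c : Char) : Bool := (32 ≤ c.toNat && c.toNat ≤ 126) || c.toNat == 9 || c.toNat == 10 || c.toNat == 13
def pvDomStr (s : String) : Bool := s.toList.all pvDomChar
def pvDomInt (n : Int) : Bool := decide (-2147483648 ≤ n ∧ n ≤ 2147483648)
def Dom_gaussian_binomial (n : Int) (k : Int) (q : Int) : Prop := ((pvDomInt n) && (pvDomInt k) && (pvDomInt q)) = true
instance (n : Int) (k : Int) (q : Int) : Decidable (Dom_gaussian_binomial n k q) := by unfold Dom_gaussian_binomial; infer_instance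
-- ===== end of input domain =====

-- B computes the Gaussian binomial by the division-free q-Pascal DP instead of A's
-- product-then-floor-division; objective: alternative algorithm (not claimed faster).

-- ===== PORT A =====
-- math.comb(n, k) is ported as Nat.choose (the branch guards give 1 ≤ k ≤ n);
-- exponents n - i and i + 1 are positive in the loop branch, so `.toNat` is exact there.
def gaussian_binomial (n : Int) (k : Int) (q : Int) : Int :=
  if k < 0 ∨ n < k then 0
  else if k = 0 then 1
  else if q = 1 then (n.toNat.choose k.toNat : Int)
  else
    let p := (PySem.List.pyRange 0 k 1).foldl
      (fun (acc : Int × Int) i =>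
        (acc.1 * (q ^ (n - i).toNat - 1), acc.2 * (q ^ (i + 1).toNat - 1)))
      (1, 1)
    PySem.Int.floordiv p.1 p.2

-- ===== PORT B =====
-- transliteration of Source B: row m holds [[m,0]_q, …, [m,k]_q]; the list indices j-1, j
-- and the final index k are always in range (row has length k+1), so pyGetD's default 0
-- is never used; q ** j has j ≥ 1 in the comprehension, so `.toNat` is exact.
def gaussian_binomial_alt (n : Int) (k : Int) (q : Int) : Int :=
  if k < 0 ∨ n < k then 0
  else if k = 0 then 1
  else if q = 1 then (n.toNat.choose k.toNat : Int)
  else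
    let row := (PySem.List.pyRange 0 n 1).foldl
      (fun (row : List Int) _ =>
        1 :: (PySem.List.pyRange 1 (k + 1) 1).map
          (fun j => PySem.List.pyGetD row (j - 1) 0 + q ^ j.toNat * PySem.List.pyGetD row j 0))
      (1 :: List.replicate k.toNat 0)
    PySem.List.pyGetD row k 0

-- ===== PRECONDITION & SPEC =====
-- Pre_ excludes exactly the inputs where A raises ZeroDivisionError: q = -1 with
-- 2 ≤ k ≤ n makes the denominator factor q^2 - 1 vanish.
def Pre_gaussian_binomial (n : Int) (k : Int) (q : Int) : Prop :=
  ¬ (q = -1 ∧ 2 ≤ k ∧ k ≤ n)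
instance (n : Int) (k : Int) (q : Int) : Decidable (Pre_gaussian_binomial n k q) := by
  unfold Pre_gaussian_binomial; infer_instance

def pvWitness_gaussian_binomial : Int × Int × Int := (5, 2, 3)

-- On q = -1 with 2 ≤ k ≤ n, A raises ZeroDivisionError while B's division-free DP
-- returns the Gaussian binomial evaluated at q = -1.
def Raises_gaussian_binomial (n : Int) (k : Int) (q : Int) : Prop :=
  q = -1 ∧ 2 ≤ k ∧ k ≤ n
instance (n : Int) (k : Int) (q : Int) : Decidable (Raises_gaussian_binomial n k q) := by
  unfold Raises_gaussian_binomial; infer_instance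
def pvRaiseWitness_gaussian_binomial : Int × Int × Int := (4, 2, -1)
def pvRaiseWitnessOut_gaussian_binomial : Int := 2

def Spec_gaussian_binomial (n : Int) (k : Int) (q : Int) (out : Int) : Prop :=
  out = gaussian_binomial_alt n k q
instance (n : Int) (k : Int) (q : Int) (out : Int) : Decidable (Spec_gaussian_binomial n k q out) := by
  unfold Spec_gaussian_binomial; infer_instance

-- ===== CLAIM (what is proved, stated in full; the proofs are below) =====
def Claim_equal_gaussian_binomial : Prop :=
  ∀ (n : Int) (k : Int) (q : Int), Dom_gaussian_binomial n k q →
    Pre_gaussian_binomial n k q → Spec_gaussian_binomial n k q (gaussian_binomial n k q)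

def Claim_raises_gaussian_binomial : Prop :=
  (∀ (n : Int) (k : Int) (q : Int), Dom_gaussian_binomial n k q →
    Raises_gaussian_binomial n k q → ¬ Pre_gaussian_binomial n k q) ∧
  (Dom_gaussian_binomial (pvRaiseWitness_gaussian_binomial.1) (pvRaiseWitness_gaussian_binomial.2.1) (pvRaiseWitness_gaussian_binomial.2.2) ∧
   Raises_gaussian_binomial (pvRaiseWitness_gaussian_binomial.1) (pvRaiseWitness_gaussian_binomial.2.1) (pvRaiseWitness_gaussian_binomial.2.2) ∧
   gaussian_binomial_alt (pvRaiseWitness_gaussian_binomial.1) (pvRaiseWitness_gaussian_binomial.2.1) (pvRaiseWitness_gaussian_binomial.2.2) = pvRaiseWitnessOut_gaussian_binomial)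

-- ===== LEMMAS AND PROOFS =====

-- [m, j]_q by the q-Pascal recurrence (what B's row DP computes)
def gbG (q : Int) : Nat → Nat → Int
  | 0, 0 => 1
  | 0, _ + 1 => 0
  | _ + 1, 0 => 1
  | m + 1, j + 1 => gbG q m j + q ^ (j + 1) * gbG q m (j + 1)

-- A's numerator ∏_{i<j} (q^{m-i} - 1) and denominator ∏_{i<j} (q^{i+1} - 1)
def gbNum (q : Int) (m j : Nat) : Int := ((List.range j).map (fun i => q ^ (m - i) - 1)).prod
def gbDen (q : Int) (j : Nat) : Int := ((List.range j).map (fun i => q ^ (i + 1) - 1)).prod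

lemma gbNum_succ_right (q : Int) (m j : Nat) :
    gbNum q m (j + 1) = gbNum q m j * (q ^ (m - j) - 1) := by
  simp [gbNum, List.range_succ]

lemma gbDen_succ (q : Int) (j : Nat) :
    gbDen q (j + 1) = gbDen q j * (q ^ (j + 1) - 1) := by
  simp [gbDen, List.range_succ]

lemma gbNum_succ_left (q : Int) (m j : Nat) :
    gbNum q (m + 1) (j + 1) = (q ^ (m + 1) - 1) * gbNum q m j := by
  simp only [gbNum, List.range_succ_eq_map, List.map_cons, List.map_map, List.prod_cons,
    Nat.sub_zero]
  refine congrArg₂ _ rfl (congrArg List.prod (List.map_congr_left ?_))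
  intro t _
  simp [Nat.succ_sub_succ]

lemma gbNum_eq_zero_of_lt (q : Int) {m j : Nat} (h : m < j) : gbNum q m j = 0 := by
  apply List.prod_eq_zero
  refine List.mem_map.mpr ⟨m, List.mem_range.mpr h, ?_⟩
  simp

-- the q-Pascal identity: numerator = DP value * denominator (no side condition)
lemma gb_key (q : Int) : ∀ m j, gbNum q m j = gbG q m j * gbDen q j := by
  intro m
  induction m with
  | zero =>
    intro j
    cases j with
    | zero => simp [gbNum, gbDen, gbG]
    | succ j => simp [gbG, gbNum_eq_zero_of_lt q (Nat.succ_pos j)]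
  | succ m ih =>
    intro j
    cases j with
    | zero => simp [gbNum, gbDen, gbG]
    | succ j =>
      rw [gbNum_succ_left, gbG]
      have step : (q ^ (m + 1) - 1) * gbNum q m j
          = gbNum q m j * (q ^ (j + 1) - 1) + q ^ (j + 1) * gbNum q m (j + 1) := by
        by_cases hjm : j ≤ m
        · rw [gbNum_succ_right q m j]
          have hq : q ^ (j + 1) * q ^ (m - j) = q ^ (m + 1) := by
            rw [← pow_add]; congr 1; omega
          linear_combination (gbNum q m j) * hq.symm
        · rw [gbNum_eq_zero_of_lt q (show m < j by omega),
              gbNum_eq_zero_of_lt q (show m < j + 1 by omega)]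
          ring
      rw [step, ih j, ih (j + 1), gbDen_succ]
      ring

lemma gbDen_ne_zero (q : Int) (K : Nat) (hq1 : q ≠ 1) (hK : q = -1 → K ≤ 1) :
    gbDen q K ≠ 0 := by
  unfold gbDen
  apply List.prod_ne_zero
  intro hmem
  obtain ⟨i, hi, heq⟩ := List.mem_map.mp hmem
  have hiK : i < K := List.mem_range.mp hi
  have hpow : q ^ (i + 1) = 1 := by omega
  by_cases hqn : q = -1
  · have hi0 : i = 0 := by have := hK hqn; omega
    subst hqn; subst hi0; simp at hpow
  · have h1 : (q ^ (i + 1)).natAbs = 1 := by rw [hpow]; rfl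
    rw [Int.natAbs_pow] at h1
    have h2 : q.natAbs = 1 := by
      rcases Nat.pow_eq_one.mp h1 with h | h
      · exact h
      · omega
    rcases Int.natAbs_eq_iff.mp h2 with h | h
    · exact hq1 (by simpa using h)
    · exact hqn (by simpa using h)

lemma floordiv_mul_cancel (a b : Int) (hb : b ≠ 0) : PySem.Int.floordiv (a * b) b = a := by
  have h := PySem.Int.floordiv_mul_add_mod (a * b) b
  have hm : PySem.Int.mod (a * b) b = 0 :=
    (PySem.Int.mod_eq_zero_iff_dvd _ _).mpr (dvd_mul_left b a)
  rw [hm, add_zero] at h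
  exact mul_right_cancel₀ hb h

-- A's loop computes (gbNum, gbDen)
lemma foldA (n q : Int) (hn : 0 ≤ n) :
    ∀ c : Nat, (c : Int) ≤ n →
      (PySem.List.pyRange 0 (c : Int) 1).foldl
        (fun (acc : Int × Int) i =>
          (acc.1 * (q ^ (n - i).toNat - 1), acc.2 * (q ^ (i + 1).toNat - 1))) (1, 1)
      = (gbNum q n.toNat c, gbDen q c) := by
  intro c
  induction c with
  | zero =>
    intro _
    rw [show ((0 : Nat) : Int) = 0 from rfl, PySem.List.pyRange_one_eq_nil (le_refl 0)]
    simp [gbNum, gbDen]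
  | succ c ih =>
    intro hc
    have hc' : (c : Int) ≤ n := by push_cast at hc ⊢; omega
    rw [show ((c + 1 : Nat) : Int) = (c : Int) + 1 by push_cast; ring,
        PySem.List.pyRange_one_succ_right (by positivity), List.foldl_append,
        ih hc', List.foldl_cons, List.foldl_nil]
    have e1 : (n - (c : Int)).toNat = n.toNat - c := by omega
    have e2 : ((c : Int) + 1).toNat = c + 1 := by omega
    rw [e1, e2, gbNum_succ_right, gbDen_succ]

lemma map_range_succ {β : Type} (f : Nat → β) (K : Nat) :
    (List.range (K + 1)).map f = f 0 :: (List.range K).map (fun t => f (t + 1)) := by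
  simp [List.range_succ_eq_map, List.map_map, Function.comp_def]

lemma rowGet (q : Int) (m K t : Nat) (ht : t < K + 1) :
    ((List.range (K + 1)).map (gbG q m)).getD t 0 = gbG q m t := by
  simp [List.getD_eq_getElem?_getD, ht]

-- one DP step on a row equals one step of gbG
lemma stepB (q k : Int) (hk : 1 ≤ k) (m : Nat) :
    (1 : Int) :: (PySem.List.pyRange 1 (k + 1) 1).map
        (fun j => PySem.List.pyGetD ((List.range (k.toNat + 1)).map (gbG q m)) (j - 1) 0
          + q ^ j.toNat * PySem.List.pyGetD ((List.range (k.toNat + 1)).map (gbG q m)) j 0)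
      = (List.range (k.toNat + 1)).map (gbG q (m + 1)) := by
  rw [PySem.List.pyRange_one, show (k + 1 - 1).toNat = k.toNat by omega, List.map_map]
  conv_rhs => rw [map_range_succ]
  refine congrArg₂ _ rfl ?_
  apply List.map_congr_left
  intro t ht
  have ht' : t < k.toNat := List.mem_range.mp ht
  simp only [Function.comp]
  have e1 : (1 : Int) + (t : Int) - 1 = ((t : Nat) : Int) := by ring
  have e2 : (1 : Int) + (t : Int) = ((t + 1 : Nat) : Int) := by push_cast; ring
  have e3 : ((1 : Int) + (t : Int)).toNat = t + 1 := by omega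
  rw [e1, e3, e2, PySem.List.pyGetD_natCast, PySem.List.pyGetD_natCast,
      rowGet q m k.toNat t (by omega), rowGet q m k.toNat (t + 1) (by omega)]
  rfl

lemma foldl_const_iterate {α β : Type} (s : β → β) :
    ∀ (l : List α) (r : β), l.foldl (fun r _ => s r) r = s^[l.length] r := by
  intro l
  induction l with
  | nil => intro r; rfl
  | cons x xs ih =>
    intro r
    rw [List.foldl_cons, ih, List.length_cons, Function.iterate_succ_apply]

lemma iterB (q k : Int) (hk : 1 ≤ k) :
    ∀ m : Nat,
      (fun (row : List Int) =>
        (1 : Int) :: (PySem.List.pyRange 1 (k + 1) 1).map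
          (fun j => PySem.List.pyGetD row (j - 1) 0 + q ^ j.toNat * PySem.List.pyGetD row j 0))^[m]
        (1 :: List.replicate k.toNat 0)
      = (List.range (k.toNat + 1)).map (gbG q m) := by
  intro m
  induction m with
  | zero =>
    rw [Function.iterate_zero_apply, map_range_succ]
    refine congrArg₂ _ rfl ?_
    rw [show (fun t => gbG q 0 (t + 1)) = (fun _ : Nat => (0 : Int)) from rfl,
        List.map_const', List.length_range]
  | succ m ih =>
    rw [Function.iterate_succ_apply', ih]
    exact stepB q k hk m

-- A's main branch evaluates to gbG
lemma A_main (n k q : Int) (hneg : ¬(k < 0 ∨ n < k)) (hk0 : ¬k = 0) (hq1 : ¬q = 1)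
    (hpre : Pre_gaussian_binomial n k q) :
    gaussian_binomial n k q = gbG q n.toNat k.toNat := by
  unfold gaussian_binomial
  rw [if_neg hneg, if_neg hk0, if_neg hq1]
  have hkc : ((k.toNat : Int)) = k := by omega
  show PySem.Int.floordiv _ _ = _
  rw [← hkc, foldA n q (by omega) k.toNat (by omega)]
  rw [gb_key q n.toNat k.toNat]
  apply floordiv_mul_cancel
  apply gbDen_ne_zero q k.toNat hq1
  intro hq
  unfold Pre_gaussian_binomial at hpre
  omega

-- B's main branch evaluates to gbG
lemma B_main (n k q : Int) (hneg : ¬(k < 0 ∨ n < k)) (hk0 : ¬k = 0) (hq1 : ¬q = 1) :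
    gaussian_binomial_alt n k q = gbG q n.toNat k.toNat := by
  unfold gaussian_binomial_alt
  rw [if_neg hneg, if_neg hk0, if_neg hq1]
  show PySem.List.pyGetD _ _ _ = _
  rw [foldl_const_iterate
        (fun (row : List Int) =>
          (1 : Int) :: (PySem.List.pyRange 1 (k + 1) 1).map
            (fun j => PySem.List.pyGetD row (j - 1) 0 + q ^ j.toNat * PySem.List.pyGetD row j 0)),
      PySem.List.length_pyRange_one, show (n - 0).toNat = n.toNat by omega,
      iterB q k (by omega)]
  have hkc : ((k.toNat : Int)) = k := by omega
  rw [← hkc, PySem.List.pyGetD_natCast]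
  exact rowGet q n.toNat k.toNat k.toNat (by omega)

-- ===== VERDICT (by name: the statement is the Claim_ definition above) =====
theorem gaussian_binomial_spec : Claim_equal_gaussian_binomial := by
  intro n k q _ hpre
  unfold Spec_gaussian_binomial
  by_cases hneg : k < 0 ∨ n < k
  · unfold gaussian_binomial gaussian_binomial_alt
    rw [if_pos hneg, if_pos hneg]
  · by_cases hk0 : k = 0
    · unfold gaussian_binomial gaussian_binomial_alt
      rw [if_neg hneg, if_neg hneg, if_pos hk0, if_pos hk0]
    · by_cases hq1 : q = 1
      · unfold gaussian_binomial gaussian_binomial_alt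
        rw [if_neg hneg, if_neg hneg, if_neg hk0, if_neg hk0, if_pos hq1, if_pos hq1]
      · rw [A_main n k q hneg hk0 hq1 hpre, B_main n k q hneg hk0 hq1]

theorem gaussian_binomial_raises : Claim_raises_gaussian_binomial := by
  unfold Claim_raises_gaussian_binomial
  exact ⟨by intro n k q _ hr hp; exact hp hr, by decide⟩

-- self-check: B's port really returns the stated value at the raise witness
theorem pvRaiseWitnessOut_ok :
    gaussian_binomial_alt 4 2 (-1) = pvRaiseWitnessOut_gaussian_binomial :=
  gaussian_binomial_raises.2.2.2
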